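-- pv_equiv track=rewrite | github.com/miliar/Code_Jam_Webscraper | solutions_python/solutions_year17_round0_nr1/598.py | solve_test
-- ===== SOURCE A (Python) =====
-- def solve_test(test):
--     k, l = test
--     n = len(l)
--     flips = [0]*n
--     tmp = 0  # nb of previous flips impacting the current pancake
--     for i in range(k-1, len(flips)):
--         # has not been flipped the right number of times
--         if (tmp + l[i-k+1]) % 2 == 0:
--             tmp += 1
--             flips[i] = 1
--         tmp -= flips[i-k+1]
--     for j in range(n-k+1, n):
--         # print "{0}, j: {1} tmp: {2} l[{1}]={3}".format(l, j, tmp, l[j])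
--         if (tmp + l[j]) % 2 == 0:
--             return None
--         tmp -= flips[j]
--     return sum(flips)
-- ===== SOURCE B (Python) =====
-- def solve_test(test):
--     # Equivalence is about the return value; B does not mutate the input list.
--     k, l = test
--     n = len(l)
--     if k > n:
--         # no window fits: possible only if every pancake is already happy
--         return 0 if all(x % 2 != 0 for x in l) else None
--     s = list(l)
--     count = 0
--     for i in range(n - k + 1):
--         if s[i] % 2 == 0:
--             count += 1
--             for j in range(i, i + k):
--                 s[j] += 1
--     if all(s[j] % 2 != 0 for j in range(n - k + 1, n)):
--         return count
--     return None
-- ===== Notes on version B (the rewrite author's own statement) =====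
-- stated objective: alternative
-- what changed: A sweeps once keeping a sliding count of active flips in 'tmp' plus a flip-marker array; B handles the no-window case k>len(l) directly and otherwise performs the greedy flips literally on a copy of the list (O(n*k) actual toggling) and then checks the tail, so no flip-parity bookkeeping exists in B.
import Mathlib
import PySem

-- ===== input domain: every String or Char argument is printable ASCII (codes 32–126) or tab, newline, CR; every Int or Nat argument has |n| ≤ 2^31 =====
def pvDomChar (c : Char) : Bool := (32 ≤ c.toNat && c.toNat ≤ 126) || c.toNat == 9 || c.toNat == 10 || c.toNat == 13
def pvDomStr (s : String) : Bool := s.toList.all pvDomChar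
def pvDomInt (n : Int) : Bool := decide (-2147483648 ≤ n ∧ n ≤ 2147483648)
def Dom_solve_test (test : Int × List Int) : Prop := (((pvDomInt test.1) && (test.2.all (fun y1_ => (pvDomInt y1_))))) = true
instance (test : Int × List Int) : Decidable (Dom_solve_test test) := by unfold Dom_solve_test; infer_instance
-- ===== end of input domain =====

-- B replaces A's sliding active-flip counter with literally performed flips on a copy,
-- plus a direct all-odd check when no window fits (k > len(l)); alternative algorithm,
-- return value only (neither program mutates its argument).

-- ===== PORT A =====
-- first loop: for i in range(k-1, n): updates (flips, tmp)
def aLoop1 (l : List Int) (k : Int) : List Int → List Int × Int → List Int × Int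
  | [], st => st
  | i :: is, (flips, tmp) =>
    let st :=
      if PySem.Int.mod (tmp + PySem.List.pyGetD l (i - k + 1) 0) 2 = 0 then
        (PySem.List.pySetD flips i (1 : Int), tmp + 1)
      else (flips, tmp)
    aLoop1 l k is (st.1, st.2 - PySem.List.pyGetD st.1 (i - k + 1) 0)

-- second loop: for j in range(n-k+1, n): early "return None"
def aLoop2 (l flips : List Int) : List Int → Int → Option Int
  | [], _ => some flips.sum
  | j :: js, tmp =>
    if PySem.Int.mod (tmp + PySem.List.pyGetD l j 0) 2 = 0 then none
    else aLoop2 l flips js (tmp - PySem.List.pyGetD flips j 0)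

def solve_test (test : Int × List Int) : Option Int :=
  let k := test.1
  let l := test.2
  let n : Int := PySem.List.len l
  let st := aLoop1 l k (PySem.List.pyRange (k - 1) n 1) (List.replicate l.length (0 : Int), 0)
  aLoop2 l st.1 (PySem.List.pyRange (n - k + 1) n 1) st.2

-- ===== PORT B =====
-- inner loop: for j in range(i, i+k): s[j] += 1
def bFlip : List Int → List Int → List Int
  | s, [] => s
  | s, j :: js => bFlip (PySem.List.pySetD s j (PySem.List.pyGetD s j 0 + 1)) js

-- outer loop: for i in range(n-k+1): flip window at i when s[i] is even
def bLoop1 (k : Int) : List Int → List Int × Int → List Int × Int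
  | [], st => st
  | i :: is, (s, count) =>
    if PySem.Int.mod (PySem.List.pyGetD s i 0) 2 = 0 then
      bLoop1 k is (bFlip s (PySem.List.pyRange i (i + k) 1), count + 1)
    else bLoop1 k is (s, count)

def solve_test_alt (test : Int × List Int) : Option Int :=
  let k := test.1
  let l := test.2
  let n : Int := PySem.List.len l
  if k > n then
    if l.all (fun x => !(PySem.Int.mod x 2 == 0)) then some 0 else none
  else
    let st := bLoop1 k (PySem.List.pyRange 0 (n - k + 1) 1) (l, 0)
    if (PySem.List.pyRange (n - k + 1) n 1).all
        (fun j => !(PySem.Int.mod (PySem.List.pyGetD st.1 j 0) 2 == 0)) then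
      some st.2
    else none

-- ===== PRECONDITION & SPEC =====
-- Pre_ is exactly the inputs where A returns: for k ≤ 0 the first loop runs off the end of l
-- (IndexError), and for k > 2*len(l)+1 the second loop indexes l below -len(l) (IndexError).
def Pre_solve_test (test : Int × List Int) : Prop :=
  1 ≤ test.1 ∧ test.1 ≤ 2 * (test.2.length : Int) + 1
instance (test : Int × List Int) : Decidable (Pre_solve_test test) := by
  unfold Pre_solve_test; infer_instance

def pvWitness_solve_test : (Int × List Int) := (3, [0, 1, 2, 1, 0])

def Spec_solve_test (test : Int × List Int) (out : Option Int) : Prop := out = solve_test_alt test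
instance (test : Int × List Int) (out : Option Int) : Decidable (Spec_solve_test test out) := by
  unfold Spec_solve_test; infer_instance

-- ===== CLAIM (what is proved, stated in full; the proofs are below) =====
def Claim_equal_solve_test : Prop :=
  ∀ (test : Int × List Int), Dom_solve_test test → Pre_solve_test test →
    Spec_solve_test test (solve_test test)

-- ===== LEMMAS AND PROOFS =====

-- window sum of flip markers over [a, b)
def wsum (f : List Int) (a b : Nat) : Int := ∑ i ∈ Finset.Ico a b, f.getD i 0

lemma wsum_succ (f : List Int) {a b : Nat} (h : a ≤ b) :
    wsum f a (b + 1) = wsum f a b + f.getD b 0 := by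
  unfold wsum; rw [Finset.sum_Ico_succ_top h]

lemma wsum_head (f : List Int) {a b : Nat} (h : a < b) :
    wsum f a b = f.getD a 0 + wsum f (a + 1) b := by
  unfold wsum; rw [Finset.sum_eq_sum_Ico_succ_bot h]

lemma getD_set (f : List Int) (j q : Nat) (v : Int) :
    (f.set j v).getD q 0 = if q = j ∧ j < f.length then v else f.getD q 0 := by
  simp [List.getD_eq_getElem?_getD, List.getElem?_set]
  split_ifs with h1 h2 h3 <;> simp_all

lemma wsum_set (f : List Int) (j : Nat) (v : Int) (a b : Nat) :
    wsum (f.set j v) a b =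
      wsum f a b + (if a ≤ j ∧ j < b ∧ j < f.length then v - f.getD j 0 else 0) := by
  unfold wsum
  have hc : ∀ i ∈ Finset.Ico a b, (f.set j v).getD i 0 =
      f.getD i 0 + (if i = j ∧ j < f.length then v - f.getD j 0 else 0) := by
    intro i _
    rw [getD_set]
    split_ifs with h1 <;> simp_all
  rw [Finset.sum_congr rfl hc, Finset.sum_add_distrib]
  congr 1
  by_cases hl : j < f.length
  · simp only [hl, and_true]
    rw [Finset.sum_ite_eq' (Finset.Ico a b) j (fun _ => v - f.getD j 0)]
    simp [Finset.mem_Ico]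
  · simp [hl]

lemma getD_of_len_le (f : List Int) {q : Nat} (h : f.length ≤ q) : f.getD q 0 = 0 := by
  simp [List.getD_eq_getElem?_getD, List.getElem?_eq_none h]

lemma wsum_ge (f : List Int) {a b : Nat} (hb : f.length ≤ b) :
    wsum f a b = wsum f a f.length := by
  unfold wsum
  by_cases ha : a ≤ f.length
  · rw [← Finset.sum_Ico_consecutive _ ha hb,
      Finset.sum_eq_zero (fun i hi => getD_of_len_le f (Finset.mem_Ico.mp hi).1), add_zero]
  · rw [Finset.sum_eq_zero (fun i hi => getD_of_len_le f
        (by have := (Finset.mem_Ico.mp hi).1; omega)),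
      Finset.sum_eq_zero (fun i hi => getD_of_len_le f
        (by have := (Finset.mem_Ico.mp hi).1; omega))]

lemma sum_eq_wsum (f : List Int) : f.sum = wsum f 0 f.length := by
  unfold wsum
  rw [Finset.sum_Ico_eq_sum_range]
  simp only [Nat.sub_zero, Nat.zero_add]
  induction f with
  | nil => simp
  | cons x t ih =>
    rw [List.sum_cons, List.length_cons, Finset.sum_range_succ', ih]
    simp [add_comm]

lemma wsum_zeros {f : List Int} (h : ∀ i : Nat, f.getD i 0 = 0) (a b : Nat) :
    wsum f a b = 0 := by
  unfold wsum; exact Finset.sum_eq_zero (fun i _ => h i)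

-- the coupling invariant between A's (flips, tmp) and B's (s, count) before window p
def CInv (l : List Int) (k p : Nat) (flips : List Int) (tmp : Int)
    (s : List Int) (count : Int) : Prop :=
  flips.length = l.length ∧ s.length = l.length ∧
  (∀ q : Nat, q < l.length → s.getD q 0 = l.getD q 0 + wsum flips q (q + k)) ∧
  tmp = wsum flips p (p + (k - 1)) ∧
  count = flips.sum ∧
  (∀ j : Nat, p + (k - 1) ≤ j → flips.getD j 0 = 0)

-- bFlip over range [p, p+c) adds one on that window
lemma bFlip_spec (c : Nat) : ∀ (p : Nat) (s : List Int),
    (bFlip s (PySem.List.pyRange (p : Int) ((p : Int) + (c : Int)) 1)).length = s.length ∧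
    ∀ q : Nat, (bFlip s (PySem.List.pyRange (p : Int) ((p : Int) + (c : Int)) 1)).getD q 0 =
      if p ≤ q ∧ q < p + c ∧ q < s.length then s.getD q 0 + 1 else s.getD q 0 := by
  induction c with
  | zero =>
    intro p s
    rw [show ((p : Int) + ((0:Nat) : Int)) = (p : Int) by push_cast; ring]
    rw [PySem.List.pyRange_one_eq_nil (le_refl _)]
    exact ⟨rfl, fun q => by rw [if_neg (by omega)]; rfl⟩
  | succ c ih =>
    intro p s
    have h1 : PySem.List.pyRange (p : Int) ((p : Int) + ((c + 1 : Nat) : Int)) 1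
        = (p : Int) ::
          PySem.List.pyRange (((p + 1 : Nat) : Int)) ((((p + 1 : Nat)) : Int) + (c : Int)) 1 := by
      have e1 : ((p : Int) + ((c + 1 : Nat) : Int)) = (((p + 1 : Nat) : Int) + (c : Int)) := by
        push_cast; ring
      have e2 : ((p : Int) + 1) = ((p + 1 : Nat) : Int) := by push_cast; ring
      rw [e1, PySem.List.pyRange_one_cons (by push_cast; omega), e2]
    rw [h1]
    simp only [bFlip, PySem.List.pySetD_natCast, PySem.List.pyGetD_natCast]
    obtain ⟨ihl, ihg⟩ := ih (p + 1) (s.set p (s.getD p 0 + 1))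
    refine ⟨by rw [ihl, List.length_set], fun q => ?_⟩
    rw [ihg q]
    simp only [List.length_set, getD_set]
    split_ifs <;> simp_all <;> omega

lemma loop1_sim (l : List Int) (k : Nat) (hk : 1 ≤ k) (hkn : k ≤ l.length) :
    ∀ (m p : Nat) (flips : List Int) (tmp : Int) (s : List Int) (count : Int),
      p + m + k = l.length + 1 → CInv l k p flips tmp s count →
      CInv l k (l.length + 1 - k)
        (aLoop1 l (k : Int) (PySem.List.pyRange ((p : Int) + (k : Int) - 1) (l.length : Int) 1) (flips, tmp)).1
        (aLoop1 l (k : Int) (PySem.List.pyRange ((p : Int) + (k : Int) - 1) (l.length : Int) 1) (flips, tmp)).2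
        (bLoop1 (k : Int) (PySem.List.pyRange (p : Int) ((l.length : Int) - (k : Int) + 1) 1) (s, count)).1
        (bLoop1 (k : Int) (PySem.List.pyRange (p : Int) ((l.length : Int) - (k : Int) + 1) 1) (s, count)).2 := by
  intro m
  induction m with
  | zero =>
    intro p flips tmp s count hm hinv
    rw [PySem.List.pyRange_one_eq_nil (by push_cast; omega),
      PySem.List.pyRange_one_eq_nil (by push_cast; omega)]
    have hp : l.length + 1 - k = p := by omega
    rw [hp]
    exact hinv
  | succ m ih =>
    intro p flips tmp s count hm hinv
    obtain ⟨hfl, hsl, hsq, htmp, hcnt, hz⟩ := hinv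
    have hplen : p + k ≤ l.length := by omega
    have hA : PySem.List.pyRange ((p:Int)+(k:Int)-1) (l.length:Int) 1 =
        ((p:Int)+(k:Int)-1) ::
          PySem.List.pyRange (((p+1:Nat):Int)+(k:Int)-1) (l.length:Int) 1 := by
      have e : ((p:Int)+(k:Int)-1)+1 = ((p+1:Nat):Int)+(k:Int)-1 := by push_cast; ring
      rw [PySem.List.pyRange_one_cons (by push_cast; omega), e]
    have hB : PySem.List.pyRange (p:Int) ((l.length:Int)-(k:Int)+1) 1 =
        (p:Int) :: PySem.List.pyRange ((p+1:Nat):Int) ((l.length:Int)-(k:Int)+1) 1 := by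
      have e : ((p:Int))+1 = ((p+1:Nat):Int) := by push_cast; ring
      rw [PySem.List.pyRange_one_cons (by push_cast; omega), e]
    rw [hA, hB]
    have eidx : ((p:Int)+(k:Int)-1) - (k:Int) + 1 = ((p:Nat):Int) := by ring
    have eset : ((p:Int)+(k:Int)-1) = ((p + (k-1) : Nat) : Int) := by
      push_cast [Nat.cast_sub hk]; ring
    have hw' : wsum flips p (p + k) = tmp := by
      have e : p + k = (p + (k-1)) + 1 := by omega
      rw [e, wsum_succ flips (by omega), hz _ (le_refl _), add_zero, htmp]
    have hsp : s.getD p 0 = l.getD p 0 + tmp := by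
      rw [hsq p (by omega), hw']
    have hargeq : tmp + l.getD p 0 = s.getD p 0 := by rw [hsp]; ring
    simp only [aLoop1, bLoop1]
    rw [eidx]
    rw [eset]
    simp only [PySem.List.pyGetD_natCast, PySem.List.pySetD_natCast]
    rw [hargeq]
    by_cases hc : PySem.Int.mod (s.getD p 0) 2 = 0
    · rw [if_pos hc, if_pos hc]
      simp only
      set F := flips.set (p + (k-1)) 1 with hF
      obtain ⟨hSlen, hSget⟩ := bFlip_spec k p s
      have hFlen : F.length = l.length := by rw [hF, List.length_set, hfl]
      have hwF : wsum F p (p + k) = tmp + 1 := by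
        rw [hF, wsum_set, hz _ (le_refl _), hw',
          if_pos ⟨by omega, by omega, by omega⟩]
        ring
      refine ih (p+1) F (tmp + 1 - F.getD p 0)
        (bFlip s (PySem.List.pyRange (p:Int) ((p:Int)+(k:Int)) 1)) (count + 1)
        (by omega) ⟨hFlen, by rw [hSlen, hsl], ?_, ?_, ?_, ?_⟩
      · -- s-invariant
        intro q hql
        rw [hSget q, hF, wsum_set, hz _ (le_refl _), hsq q hql]
        simp only [hsl, hfl, sub_zero]
        split_ifs with h1 h2 <;> first | ring1 | (exfalso; omega)
      · -- tmp invariant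
        have e3 : (p+1) + (k-1) = p + k := by omega
        rw [e3]
        have hh := wsum_head F (show p < p + k by omega)
        rw [hwF] at hh
        omega
      · -- count invariant
        rw [hcnt, sum_eq_wsum F, sum_eq_wsum flips, hF, List.length_set, wsum_set,
          hz _ (le_refl _), if_pos ⟨by omega, by omega, by omega⟩]
        ring
      · -- zeros
        intro j hj
        rw [hF, getD_set, if_neg (by omega)]
        exact hz j (by omega)
    · rw [if_neg hc, if_neg hc]
      simp only
      refine ih (p+1) flips (tmp - flips.getD p 0) s count (by omega)
        ⟨hfl, hsl, hsq, ?_, hcnt, fun j hj => hz j (by omega)⟩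
      have e3 : (p+1) + (k-1) = p + k := by omega
      rw [e3]
      have hh := wsum_head flips (show p < p + k by omega)
      rw [hw'] at hh
      omega

lemma loop2_sim (l flips s : List Int) (hs : s.length = l.length) :
    ∀ (m a : Nat), a + m = l.length →
      (∀ q : Nat, a ≤ q → q < l.length → s.getD q 0 = l.getD q 0 + wsum flips q l.length) →
      aLoop2 l flips (PySem.List.pyRange (a : Int) (l.length : Int) 1) (wsum flips a l.length) =
        (if (PySem.List.pyRange (a : Int) (l.length : Int) 1).all
            (fun j => !(PySem.Int.mod (PySem.List.pyGetD s j 0) 2 == 0)) then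
          some flips.sum
        else none) := by
  intro m
  induction m generalizing s with
  | zero =>
    intro a ha hinv
    have : a = l.length := by omega
    subst this
    rw [PySem.List.pyRange_one_eq_nil (le_refl _)]
    simp [aLoop2]
  | succ m ih =>
    intro a ha hinv
    have hlt : a < l.length := by omega
    have hcons : PySem.List.pyRange (a : Int) (l.length : Int) 1
        = (a : Int) :: PySem.List.pyRange ((a + 1 : Nat) : Int) (l.length : Int) 1 := by
      have e2 : ((a : Int) + 1) = ((a + 1 : Nat) : Int) := by push_cast; ring
      rw [PySem.List.pyRange_one_cons (by push_cast; omega), e2]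
    rw [hcons]
    simp only [aLoop2, List.all_cons, PySem.List.pyGetD_natCast]
    have harg : wsum flips a l.length + l.getD a 0 = s.getD a 0 := by
      rw [hinv a le_rfl hlt]; ring
    rw [harg]
    by_cases h : PySem.Int.mod (s.getD a 0) 2 = 0
    · have hb : (!(PySem.Int.mod (s.getD a 0) 2 == 0)) = false := by rw [h]; rfl
      rw [if_pos h]; simp only [hb, Bool.false_and]; rfl
    · have hb : (!(PySem.Int.mod (s.getD a 0) 2 == 0)) = true := by
        cases hc : (PySem.Int.mod (s.getD a 0) 2 == 0) with
        | false => rfl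
        | true => exact absurd (beq_iff_eq.mp hc) h
      rw [if_neg h]
      simp only [hb, Bool.true_and]
      have ht : wsum flips a l.length - flips.getD a 0 = wsum flips (a + 1) l.length := by
        rw [wsum_head flips hlt]; ring
      rw [ht]
      exact ih s hs (a + 1) (by omega) (fun q hq hql => hinv q (by omega) hql)

lemma getD_replicate (n : Nat) (j : Int) :
    PySem.List.pyGetD (List.replicate n (0:Int)) j 0 = 0 := by
  by_cases h : PySem.Raise.InRange (List.replicate n (0:Int)).length j
  · have := PySem.List.pyGetD_mem (xs := List.replicate n (0:Int)) (i := j) (d := 0) h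
    exact List.eq_of_mem_replicate this
  · rw [PySem.List.pyGetD_of_none _ _ _ ((PySem.List.pyGet?_eq_none_iff _ _).mpr h)]

lemma loop2_zeros (l : List Int) (n : Nat) : ∀ (js : List Int),
    aLoop2 l (List.replicate n (0 : Int)) js 0 =
      (if js.all (fun j => !(PySem.Int.mod (PySem.List.pyGetD l j 0) 2 == 0)) then some 0
       else none) := by
  intro js
  induction js with
  | nil => simp [aLoop2]
  | cons j js ih =>
    simp only [aLoop2, getD_replicate, zero_add, sub_zero, List.all_cons, ih]
    by_cases h : PySem.Int.mod (PySem.List.pyGetD l j 0) 2 = 0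
    · have hb : (!(PySem.Int.mod (PySem.List.pyGetD l j 0) 2 == 0)) = false := by
        rw [h]; rfl
      rw [if_pos h]; simp only [hb, Bool.false_and]; rfl
    · have hb : (!(PySem.Int.mod (PySem.List.pyGetD l j 0) 2 == 0)) = true := by
        cases hc : (PySem.Int.mod (PySem.List.pyGetD l j 0) 2 == 0) with
        | false => rfl
        | true => exact absurd (beq_iff_eq.mp hc) h
      rw [if_neg h]; simp only [hb, Bool.true_and]

lemma getD_replicate_nat (n i : Nat) : (List.replicate n (0:Int)).getD i 0 = 0 := by
  by_cases h : i < n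
  · simp [List.getD_eq_getElem?_getD, List.getElem?_replicate, h]
  · exact getD_of_len_le _ (by simpa using h)

lemma range_all_eq (l : List Int) (kI : Int) (h1 : (l.length:Int) < kI)
    (h2 : kI ≤ 2*(l.length:Int)+1) :
    (PySem.List.pyRange ((l.length:Int) - kI + 1) (l.length:Int) 1).all
        (fun j => !(PySem.Int.mod (PySem.List.pyGetD l j 0) 2 == 0))
      = l.all (fun x => !(PySem.Int.mod x 2 == 0)) := by
  rw [Bool.eq_iff_iff, List.all_eq_true, List.all_eq_true]
  constructor
  · intro h x hx
    obtain ⟨t, ht, rfl⟩ := List.mem_iff_getElem.mp hx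
    have hm : ((t:Int)) ∈ PySem.List.pyRange ((l.length:Int) - kI + 1) (l.length:Int) 1 := by
      rw [PySem.List.mem_pyRange_one]
      constructor <;> push_cast <;> omega
    have := h _ hm
    rw [PySem.List.pyGetD_natCast] at this
    rwa [List.getD_eq_getElem l 0 ht] at this
  · intro h j hj
    rw [PySem.List.mem_pyRange_one] at hj
    have hin : PySem.Raise.InRange l.length j := by
      simp [PySem.Raise.InRange]; omega
    exact h _ (PySem.List.pyGetD_mem l 0 hin)

-- ===== VERDICT (by name: the statement is the Claim_ definition above) =====
theorem solve_test_spec : Claim_equal_solve_test := by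
  unfold Claim_equal_solve_test
  intro test _ hpre
  obtain ⟨kI, l⟩ := test
  obtain ⟨hk1, hk2⟩ := hpre
  unfold Spec_solve_test solve_test solve_test_alt
  simp only [PySem.List.len_eq]
  by_cases hbig : (l.length : Int) < kI
  · -- k > n : A's first loop range is empty, its second loop sees only zeros
    rw [PySem.List.pyRange_one_eq_nil (by omega)]
    rw [if_pos hbig]
    simp only [aLoop1]
    rw [loop2_zeros l l.length _, range_all_eq l kI hbig hk2]
  · -- 1 ≤ k ≤ n : run the coupled loops
    rw [if_neg hbig]
    have hkc : kI = (kI.toNat : Int) := (Int.toNat_of_nonneg (by omega)).symm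
    set k : Nat := kI.toNat with hkdef
    have hk : 1 ≤ k := by omega
    have hkn : k ≤ l.length := by omega
    rw [hkc]
    have hrep : ∀ i : Nat, (List.replicate l.length (0:Int)).getD i 0 = 0 :=
      fun i => getD_replicate_nat _ _
    have hinv0 : CInv l k 0 (List.replicate l.length 0) 0 l 0 := by
      refine ⟨List.length_replicate, rfl, ?_, ?_, ?_, ?_⟩
      · intro q hq; rw [wsum_zeros hrep]; ring
      · rw [wsum_zeros hrep]
      · rw [List.sum_replicate]; simp
      · intro j _; exact hrep j
    have H := loop1_sim l k hk hkn (l.length + 1 - k) 0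
      (List.replicate l.length 0) 0 l 0 (by omega) hinv0
    have er : (l.length:Int) - (k:Int) + 1 = ((l.length + 1 - k : Nat) : Int) := by omega
    rw [show ((0:Nat):Int) + (k:Int) - 1 = (k:Int) - 1 by push_cast; ring,
      show ((0:Nat):Int) = (0:Int) from rfl, er] at H
    rw [er]
    obtain ⟨hFlen, hSlen, hsqF, htmpF, hcntF, -⟩ := H
    have e4 : (l.length + 1 - k) + (k - 1) = l.length := by omega
    rw [e4] at htmpF
    have hsim := loop2_sim l
      (aLoop1 l (k:Int) (PySem.List.pyRange ((k:Int) - 1) (l.length:Int) 1)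
        (List.replicate l.length 0, 0)).1
      (bLoop1 (k:Int) (PySem.List.pyRange 0 ((l.length + 1 - k : Nat) : Int) 1) (l, 0)).1
      hSlen (k - 1) (l.length + 1 - k) (by omega)
      (fun q hq hql => by
        rw [hsqF q hql, wsum_ge _ (by rw [hFlen]; omega), hFlen])
    rw [htmpF, hsim, hcntF]
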